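-- pv_equiv track=rewrite | github.com/Sarah-Elna/FASTA_reads | overview.py | fill_empty_dict
-- ===== SOURCE A (Python) =====
-- def get_sp_lst(result_list):
--     sp_lst = []
--     for result in result_list:
--         if result[1] not in sp_lst:
--             sp_lst.append(result[1])
--     return sp_lst
--
-- def get_gen_lst(result_list):
--     gen_lst = []
--     for result in result_list:
--         if result[0] not in gen_lst:
--             gen_lst.append(result[0])
--     return gen_lst
--
-- def get_empty_genbank_dict(sp_lst, gen_lst):
--     empty_genbank_dict = {}
--     for g in gen_lst:
--         empty_genbank_dict[g] = 0
--     return empty_genbank_dict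
--
-- def fill_empty_dict(result_list):
--     sp_lst = get_sp_lst(result_list)
--     gen_lst = get_gen_lst(result_list)
--     genbank_dict = get_empty_genbank_dict(sp_lst, gen_lst)
--     for g in gen_lst:
--         g_sp_lst = []
--         g_count = 0
--         for result in result_list:
--             if g == result[0]:
--                 if result[1] not in g_sp_lst:
--                     g_count += 1
--                     g_sp_lst.append(result[1])
--         genbank_dict[g] = '{} / {}'.format(g_count, len(sp_lst))
--     return genbank_dict
-- ===== SOURCE B (Python) =====
-- def fill_empty_dict(result_list):
--     all_species = set()
--     genus_species = {}
--     for result in result_list: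
--         genus_species.setdefault(result[0], set()).add(result[1])
--         all_species.add(result[1])
--     total = len(all_species)
--     return {g: '{} / {}'.format(len(sps), total) for g, sps in genus_species.items()}
-- ===== Notes on version B (the rewrite author's own statement) =====
-- stated objective: faster
-- what changed: Replaces A's per-genus rescan of result_list (plus two dedup prepasses with linear list membership) by a single grouping pass maintaining a dict of genus->species-set and a global species set, then one emit pass over the grouped dict.
import Mathlib
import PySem

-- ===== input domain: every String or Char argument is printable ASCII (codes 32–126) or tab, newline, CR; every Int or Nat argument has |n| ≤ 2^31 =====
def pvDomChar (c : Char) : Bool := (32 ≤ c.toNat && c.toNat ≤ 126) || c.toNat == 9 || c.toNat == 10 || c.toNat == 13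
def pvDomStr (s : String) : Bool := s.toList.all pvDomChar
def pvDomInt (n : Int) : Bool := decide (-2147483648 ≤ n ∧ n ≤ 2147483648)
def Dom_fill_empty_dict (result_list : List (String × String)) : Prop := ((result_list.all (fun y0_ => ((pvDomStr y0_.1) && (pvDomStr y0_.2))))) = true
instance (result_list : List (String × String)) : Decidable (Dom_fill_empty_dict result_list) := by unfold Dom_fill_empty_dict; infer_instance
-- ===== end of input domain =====

-- B replaces A's per-genus rescans of result_list (and two dedup prepasses) by one
-- grouping pass over the list plus one emit pass over the grouped dict (objective: faster).


-- ===== PORT A =====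
def get_sp_lst (result_list : List (String × String)) : List String :=
  result_list.foldl (fun sp_lst result =>
    if sp_lst.contains result.2 then sp_lst else sp_lst ++ [result.2]) []

def get_gen_lst (result_list : List (String × String)) : List String :=
  result_list.foldl (fun gen_lst result =>
    if gen_lst.contains result.1 then gen_lst else gen_lst ++ [result.1]) []

-- Python initialises each genus to int 0; every key is overwritten with a string before
-- the dict is returned, so the placeholder is ported as the string "0".
def get_empty_genbank_dict (sp_lst gen_lst : List String) : PySem.Dict String String :=
  gen_lst.foldl (fun d g => d.insert g "0") PySem.Dict.empty

def fill_empty_dict (result_list : List (String × String)) : List (String × String) :=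
  let sp_lst := get_sp_lst result_list
  let gen_lst := get_gen_lst result_list
  let genbank_dict := get_empty_genbank_dict sp_lst gen_lst
  let final := gen_lst.foldl (fun d g =>
    let st := result_list.foldl (fun (st : List String × Int) result =>
      if g == result.1 then
        (if st.1.contains result.2 then st else (st.1 ++ [result.2], st.2 + 1))
      else st) ([], 0)
    d.insert g (PySem.Int.toStr st.2 ++ " / " ++ PySem.Int.toStr (sp_lst.length : Int)))
    genbank_dict
  final.items

-- ===== PORT B =====
def fill_empty_dict_alt (result_list : List (String × String)) : List (String × String) :=
  let st := result_list.foldl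
    (fun (st : PySem.Set String × PySem.Dict String (PySem.Set String)) result =>
      (PySem.Set.add st.1 result.2,
       st.2.modify result.1 PySem.Set.empty (fun s => PySem.Set.add s result.2)))
    (PySem.Set.empty, PySem.Dict.empty)
  let total := PySem.Set.len st.1
  st.2.items.map (fun p =>
    (p.1, PySem.Int.toStr (PySem.Set.len p.2) ++ " / " ++ PySem.Int.toStr total))

-- ===== PRECONDITION & SPEC =====
def Spec_fill_empty_dict (result_list : List (String × String)) (out : List (String × String)) : Prop := out = fill_empty_dict_alt result_list
instance (result_list : List (String × String)) (out : List (String × String)) : Decidable (Spec_fill_empty_dict result_list out) := by unfold Spec_fill_empty_dict; infer_instance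

-- ===== CLAIM (what is proved, stated in full; the proofs are below) =====
def Claim_equal_fill_empty_dict : Prop := ∀ (result_list : List (String × String)), Dom_fill_empty_dict result_list → Spec_fill_empty_dict result_list (fill_empty_dict result_list)

-- ===== LEMMAS AND PROOFS =====

-- a fold over a pair with independent components splits into two folds
theorem pv_foldl_prod {α β γ : Type} (l : List α) (f : β → α → β) (g : γ → α → γ)
    (b : β) (c : γ) :
    l.foldl (fun st r => (f st.1 r, g st.2 r)) (b, c) = (l.foldl f b, l.foldl g c) := by
  induction l generalizing b c with
  | nil => rfl
  | cons x xs ih => simpa using ih (f b x) (g c x)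

theorem pv_sp_lst_eq (rl : List (String × String)) :
    get_sp_lst rl = PySem.Set.ofList (rl.map (·.2)) := by
  rw [← PySem.Set.update_nil_left, PySem.Set.update_map_eq_foldl_add]
  rfl

theorem pv_gen_lst_eq (rl : List (String × String)) :
    get_gen_lst rl = PySem.Set.ofList (rl.map (·.1)) := by
  rw [← PySem.Set.update_nil_left, PySem.Set.update_map_eq_foldl_add]
  rfl

-- B's grouping loop: value at a genus key
theorem pv_getD_group (rl : List (String × String)) (g : String)
    (d : PySem.Dict String (PySem.Set String)) :
    (rl.foldl (fun d r => d.modify r.1 PySem.Set.empty (fun s => PySem.Set.add s r.2)) d).getD g PySem.Set.empty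
      = PySem.Set.update (d.getD g PySem.Set.empty) ((rl.filter (fun r => r.1 == g)).map (·.2)) := by
  induction rl generalizing d with
  | nil => rfl
  | cons r rs ih =>
    simp only [List.foldl_cons, ih, List.filter_cons]
    by_cases h : r.1 = g
    · simp [h, PySem.Set.update_cons]
    · have hf : (r.1 == g) = false := by simp [h]
      have h2 : ¬ g = r.1 := fun e => h e.symm
      simp [hf, PySem.Dict.getD_modify, h2]

-- last-write-wins for an insert loop whose value depends only on the key
theorem pv_getD_insert_loop (gl : List String) (v : String → String)
    (d : PySem.Dict String String) (k : String) (dflt : String) :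
    (gl.foldl (fun d g => d.insert g (v g)) d).getD k dflt
      = if k ∈ gl then v k else d.getD k dflt := by
  induction gl generalizing d with
  | nil => simp
  | cons g gs ih =>
    simp only [List.foldl_cons, ih]
    by_cases hk : k ∈ gs
    · simp [hk]
    · by_cases he : k = g <;> simp [hk, he, PySem.Dict.getD_insert]

-- A's inner loop, with the invariant g_count = length of g_sp_lst
theorem pv_inner_A (g : String) (rl : List (String × String)) (sp : List String) :
    rl.foldl (fun (st : List String × Int) r =>
        if g == r.1 then
          (if st.1.contains r.2 then st else (st.1 ++ [r.2], st.2 + 1))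
        else st) (sp, (sp.length : Int))
      = (PySem.Set.update sp ((rl.filter (fun r => r.1 == g)).map (·.2)),
         ((PySem.Set.update sp ((rl.filter (fun r => r.1 == g)).map (·.2))).length : Int)) := by
  induction rl generalizing sp with
  | nil => rfl
  | cons r rs ih =>
    simp only [List.foldl_cons, List.filter_cons]
    by_cases h : r.1 = g
    · have hg : (g == r.1) = true := by simp [h]
      have hg' : (r.1 == g) = true := by simp [h]
      simp only [hg, hg', if_true]
      by_cases hc : r.2 ∈ sp
      · have : sp.contains r.2 = true := by simpa using hc
        simp only [this, if_true]
        rw [ih sp]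
        simp [PySem.Set.update_cons, PySem.Set.add_of_mem hc]
      · have : sp.contains r.2 = false := by simpa using hc
        simp only [this]
        have hadd : PySem.Set.add sp r.2 = sp ++ [r.2] := PySem.Set.add_of_not_mem hc
        have := ih (sp ++ [r.2])
        simp only [List.length_append, List.length_singleton] at this
        simp only [if_false, Bool.false_eq_true]
        rw [show ((sp.length : Int) + 1) = (((sp.length + 1 : Nat)) : Int) by push_cast; ring]
        rw [this]
        simp [PySem.Set.update_cons, hadd]
    · have h2 : ¬ g = r.1 := fun e => h e.symm
      have hg : (g == r.1) = false := by simp [h2]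
      have hg' : (r.1 == g) = false := by simp [h]
      simp only [hg, hg', Bool.false_eq_true, if_false]
      exact ih sp

-- ===== VERDICT (by name: the statement is the Claim_ definition above) =====
theorem fill_empty_dict_spec : Claim_equal_fill_empty_dict := by
  intro rl _
  unfold Spec_fill_empty_dict fill_empty_dict fill_empty_dict_alt
  simp only []
  rw [pv_foldl_prod rl (fun s (r : String × String) => PySem.Set.add s r.2)
      (fun d (r : String × String) => d.modify r.1 PySem.Set.empty (fun s => PySem.Set.add s r.2))
      PySem.Set.empty PySem.Dict.empty]
  set gl := get_gen_lst rl with hgl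
  have hglNodup : gl.Nodup := by rw [hgl, pv_gen_lst_eq]; exact PySem.Set.nodup_ofList _
  have hall : rl.foldl (fun s (r : String × String) => PySem.Set.add s r.2) ([] : PySem.Set String)
      = PySem.Set.ofList (rl.map (·.2)) := by
    rw [← PySem.Set.update_map_eq_foldl_add rl (·.2) [], PySem.Set.update_nil_left]
  have hgroupKeys : (rl.foldl (fun d r => d.modify r.1 PySem.Set.empty (fun s => PySem.Set.add s r.2)) PySem.Dict.empty).keys = gl := by
    rw [PySem.Dict.keys_foldl_modify_key rl (fun r => r.1) PySem.Set.empty (fun _ r s => PySem.Set.add s r.2)]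
    rw [show (PySem.Dict.empty : PySem.Dict String (PySem.Set String)).keys = ([] : List String) from rfl,
        PySem.Set.update_nil_left, hgl, pv_gen_lst_eq]
  have hgroupNodup : (rl.foldl (fun d r => d.modify r.1 PySem.Set.empty (fun s => PySem.Set.add s r.2)) PySem.Dict.empty).keys.Nodup :=
    PySem.Dict.nodup_keys_foldl_modify_key rl (fun r => r.1) PySem.Set.empty (fun _ r s => PySem.Set.add s r.2) PySem.Dict.empty (by simp [PySem.Dict.keys_empty])
  rw [PySem.Dict.items_eq_map_keys _ hgroupNodup PySem.Set.empty, hgroupKeys, List.map_map]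
  -- A's outer loop
  have hd0keys : (get_empty_genbank_dict (get_sp_lst rl) gl).keys = gl := by
    unfold get_empty_genbank_dict
    rw [PySem.Dict.keys_foldl_insert gl (fun _ g => "0") PySem.Dict.empty]
    rw [show (PySem.Dict.empty : PySem.Dict String String).keys = ([] : List String) from rfl,
        PySem.Set.update_nil_left, PySem.Set.ofList_eq_self_of_nodup _ hglNodup]
  have hFkeys : (gl.foldl (fun d g => d.insert g
      (PySem.Int.toStr (rl.foldl (fun (st : List String × Int) r =>
          if g == r.1 then (if st.1.contains r.2 then st else (st.1 ++ [r.2], st.2 + 1)) else st) ([], 0)).2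
        ++ " / " ++ PySem.Int.toStr ((get_sp_lst rl).length : Int)))
      (get_empty_genbank_dict (get_sp_lst rl) gl)).keys = gl := by
    rw [PySem.Dict.keys_foldl_insert gl _ _, hd0keys, PySem.Set.update_eq_append_filter]
    simp [PySem.Set.ofList_eq_self_of_nodup _ hglNodup, List.filter_eq_nil_iff]
  have hFnodup := PySem.Dict.nodup_keys_foldl_insert gl
      (fun _ g => PySem.Int.toStr (rl.foldl (fun (st : List String × Int) r =>
          if g == r.1 then (if st.1.contains r.2 then st else (st.1 ++ [r.2], st.2 + 1)) else st) ([], 0)).2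
        ++ " / " ++ PySem.Int.toStr ((get_sp_lst rl).length : Int))
      (get_empty_genbank_dict (get_sp_lst rl) gl) (by rw [hd0keys]; exact hglNodup)
  rw [PySem.Dict.items_eq_map_keys _ hFnodup "", hFkeys]
  apply List.map_congr_left
  intro g hgmem
  rw [pv_getD_insert_loop gl
      (fun g => PySem.Int.toStr (rl.foldl (fun (st : List String × Int) r =>
          if g == r.1 then (if st.1.contains r.2 then st else (st.1 ++ [r.2], st.2 + 1)) else st) ([], 0)).2
        ++ " / " ++ PySem.Int.toStr ((get_sp_lst rl).length : Int))]
  simp only [hgmem, if_true, Function.comp]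
  have hinner := pv_inner_A g rl []
  simp only [List.length_nil, Nat.cast_zero] at hinner
  rw [hinner, pv_getD_group, PySem.Dict.getD_empty]
  simp [hall, PySem.Set.len, pv_sp_lst_eq, PySem.Set.update_nil_left]
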